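-- pv_equiv track=rewrite | github.com/shlyapp/ege-informatika | info-ege-academiaa/variant 2/22.py | f
-- ===== SOURCE A (Python) =====
-- def f(x):
--     a = 0
--     b = 0
--     while x > 0:
--         a = a + 1
--         b = b + (x % 100)
--         x = x // 100
--     return (a, b)
-- ===== SOURCE B (Python) =====
-- def _chunks(s):
--     if not s:
--         return []
--     return [int(s[:2])] + _chunks(s[2:])
--
--
-- def f(x):
--     if x <= 0:
--         return (0, 0)
--     s = str(x)
--     if len(s) % 2 == 1:
--         s = '0' + s
--     cs = _chunks(s)
--     return (len(cs), sum(cs))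
-- ===== Notes on version B (the rewrite author's own statement) =====
-- stated objective: alternative
-- what changed: Instead of repeatedly dividing by 100 in a while loop, B converts x to its decimal string, left-pads it to even length, and recursively splits it into 2-character chunks, returning (chunk count, sum of chunk values).
import Mathlib
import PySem

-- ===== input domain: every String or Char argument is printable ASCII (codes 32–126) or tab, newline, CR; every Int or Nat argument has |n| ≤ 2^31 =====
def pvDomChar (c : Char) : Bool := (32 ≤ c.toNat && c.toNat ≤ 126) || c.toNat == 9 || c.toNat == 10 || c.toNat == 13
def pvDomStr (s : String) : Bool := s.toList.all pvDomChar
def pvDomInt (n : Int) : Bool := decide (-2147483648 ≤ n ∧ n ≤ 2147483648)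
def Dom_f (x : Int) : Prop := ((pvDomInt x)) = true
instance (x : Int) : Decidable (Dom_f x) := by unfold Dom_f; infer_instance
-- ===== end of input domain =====

-- B replaces A's repeated division by 100 with a recursive 2-character chunking of the
-- decimal string (alternative decomposition, same asymptotic cost).

-- ===== PORT A =====
-- the while loop: state (a, b), loop condition x > 0
def fGo (a b x : Int) : Int × Int :=
  if _h : 0 < x then
    fGo (a + 1) (b + PySem.Int.mod x 100) (PySem.Int.floordiv x 100)
  else (a, b)
termination_by x.toNat
decreasing_by
  rw [PySem.Int.floordiv_eq_ediv_of_pos (by norm_num)]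
  omega

def f (x : Int) : Int × Int := fGo 0 0 x

-- ===== PORT B =====
-- _chunks(s): int(s[:2]) prepended to _chunks(s[2:]); int() never fails on the digit
-- strings f_alt builds, `.getD 0` is only the Option default of PySem.Int.ofChars?
def chunksB : List Char → List Int
  | [] => []
  | [c] => [(PySem.Int.ofChars? [c]).getD 0]
  | c :: d :: rest => (PySem.Int.ofChars? [c, d]).getD 0 :: chunksB rest

def f_alt (x : Int) : Int × Int :=
  if x ≤ 0 then (0, 0)
  else
    let s := PySem.Int.toChars x
    let s := if s.length % 2 == 1 then '0' :: s else s
    let cs := chunksB s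
    ((cs.length : Int), cs.sum)

-- ===== PRECONDITION & SPEC =====
def Spec_f (x : Int) (out : Int × Int) : Prop := out = f_alt x
instance (x : Int) (out : Int × Int) : Decidable (Spec_f x out) := by unfold Spec_f; infer_instance

-- ===== CLAIM (what is proved, stated in full; the proofs are below) =====
def Claim_equal_f : Prop := ∀ (x : Int), Dom_f x → Spec_f x (f x)

-- ===== LEMMAS AND PROOFS =====

-- decimal digit characters of n, most significant first
def decChars (n : Nat) : List Char := ((Nat.digits 10 n).map Nat.digitChar).reverse

-- decChars left-padded with '0' to even length (what f_alt's padding produces)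
def padChars (n : Nat) : List Char :=
  if (decChars n).length % 2 == 1 then '0' :: decChars n else decChars n

lemma toDigitsCore_spec : ∀ (fuel n : Nat) (acc : List Char), n < fuel →
    Nat.toDigitsCore 10 fuel n acc = (if n = 0 then ['0'] else decChars n) ++ acc := by
  intro fuel
  induction fuel with
  | zero => intro n acc h; omega
  | succ f ih =>
    intro n acc h
    rw [Nat.toDigitsCore]
    by_cases h0 : n / 10 = 0
    · simp only [h0, if_pos]
      by_cases hn : n = 0
      · subst hn; simp [Nat.digitChar]
      · have h10 : n < 10 := by omega
        have : Nat.digits 10 n = [n] := by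
          rw [Nat.digits_def' (by norm_num) (by omega)]
          simp [Nat.mod_eq_of_lt h10, h0]
        simp [decChars, this, hn, Nat.mod_eq_of_lt h10]
    · simp only [h0]
      rw [ih (n / 10) _ (by omega)]
      have hn : n ≠ 0 := by omega
      have : Nat.digits 10 n = n % 10 :: Nat.digits 10 (n / 10) := by
        rw [Nat.digits_def' (by norm_num) (by omega)]
      simp [decChars, this, h0, hn]

lemma toDigits_eq (n : Nat) (hn : 0 < n) : Nat.toDigits 10 n = decChars n := by
  rw [Nat.toDigits, toDigitsCore_spec (n + 1) n [] (by omega)]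
  have : n ≠ 0 := by omega
  simp [this]

lemma chunksB_append (l t : List Char) (h : l.length % 2 = 0) :
    chunksB (l ++ t) = chunksB l ++ chunksB t := by
  induction l using chunksB.induct with
  | case1 => simp [chunksB]
  | case2 c => simp at h
  | case3 c d rest ih =>
    simp only [List.length_cons] at h
    simp only [List.cons_append, chunksB, ih (by omega)]

lemma padChars_even (n : Nat) : (padChars n).length % 2 = 0 := by
  unfold padChars
  rcases Nat.even_or_odd (decChars n).length with h | h
  · have : (decChars n).length % 2 = 0 := Nat.even_iff.mp h
    simp [this]
  · have h1 : (decChars n).length % 2 = 1 := Nat.odd_iff.mp h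
    simp [h1]
    omega

lemma ofChars?_digit_pair (a b : Nat) (ha : a < 10) (hb : b < 10) :
    PySem.Int.ofChars? [Nat.digitChar a, Nat.digitChar b] = some ((10 * a + b : Nat) : Int) :=
  (by decide : ∀ a b : Fin 10, PySem.Int.ofChars? [Nat.digitChar a.val, Nat.digitChar b.val]
      = some ((10 * a.val + b.val : Nat) : Int)) ⟨a, ha⟩ ⟨b, hb⟩

lemma chunksB_padChars (n : Nat) (hn : 0 < n) :
    chunksB (padChars n) = ((Nat.digits 100 n).map (fun d => (d : Int))).reverse := by
  induction n using Nat.strong_induction_on with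
  | _ n ih =>
  by_cases hs : n < 100
  · have hd : Nat.digits 100 n = [n] := by
      rw [Nat.digits_def' (by norm_num) hn, Nat.mod_eq_of_lt hs, Nat.div_eq_of_lt hs]
      simp
    by_cases h10 : n < 10
    · have hdec : decChars n = [Nat.digitChar n] := by
        rw [decChars, Nat.digits_def' (by norm_num) hn, Nat.mod_eq_of_lt h10,
            Nat.div_eq_of_lt h10]
        simp
      have hp : padChars n = ['0', Nat.digitChar n] := by simp [padChars, hdec]
      rw [hp, hd]
      simp only [chunksB, show ('0' : Char) = Nat.digitChar 0 from rfl,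
                 ofChars?_digit_pair 0 n (by norm_num) h10]
      simp
    · have hdec : decChars n = [Nat.digitChar (n / 10 % 10), Nat.digitChar (n % 10)] := by
        rw [decChars, Nat.digits_def' (by norm_num) hn,
            Nat.digits_def' (by norm_num) (by omega : 0 < n / 10)]
        have h00 : n / 10 / 10 = 0 := by omega
        simp [h00]
      have hp : padChars n = [Nat.digitChar (n / 10 % 10), Nat.digitChar (n % 10)] := by
        simp [padChars, hdec]
      rw [hp, hd]
      simp [chunksB, ofChars?_digit_pair (n / 10 % 10) (n % 10) (by omega) (by omega)]
      omega
  · -- n ≥ 100: peel the last two decimal digits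
    have h1 : 0 < n / 10 := by omega
    have h2 : 0 < n / 100 := by omega
    have hdd : n / 10 / 10 = n / 100 := by omega
    have hdec : decChars n
        = decChars (n / 100) ++ [Nat.digitChar (n / 10 % 10), Nat.digitChar (n % 10)] := by
      rw [decChars, Nat.digits_def' (by norm_num) hn, Nat.digits_def' (by norm_num) h1, hdd]
      simp [decChars]
    have hpad : padChars n
        = padChars (n / 100) ++ [Nat.digitChar (n / 10 % 10), Nat.digitChar (n % 10)] := by
      unfold padChars
      rw [hdec]
      have heq : (decChars (n / 100)
          ++ [Nat.digitChar (n / 10 % 10), Nat.digitChar (n % 10)]).length % 2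
          = (decChars (n / 100)).length % 2 := by simp [Nat.add_mod]
      rw [heq]
      by_cases hpar : (decChars (n / 100)).length % 2 = 1 <;> simp [hpar]
    have hdig : Nat.digits 100 n = n % 100 :: Nat.digits 100 (n / 100) :=
      Nat.digits_def' (by norm_num) hn
    rw [hpad, chunksB_append _ _ (padChars_even (n / 100)),
        ih (n / 100) (by omega) h2, hdig]
    have hpair : (10 : Nat) * (n / 10 % 10) + n % 10 = n % 100 := by omega
    simp [chunksB, ofChars?_digit_pair (n / 10 % 10) (n % 10) (by omega) (by omega), hpair]

lemma fGo_spec (n : Nat) : ∀ a b : Int,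
    fGo a b (n : Int) = (a + ((Nat.digits 100 n).length : Int),
                         b + ((Nat.digits 100 n).map (fun d => (d : Int))).sum) := by
  induction n using Nat.strong_induction_on with
  | _ n ih =>
  intro a b
  by_cases hn : 0 < n
  · rw [fGo]
    have hx : (0 : Int) < (n : Int) := by exact_mod_cast hn
    rw [dif_pos hx]
    have hm : PySem.Int.mod (n : Int) 100 = ((n % 100 : Nat) : Int) := by
      exact_mod_cast PySem.Int.mod_natCast n 100
    have hdv : PySem.Int.floordiv (n : Int) 100 = ((n / 100 : Nat) : Int) := by
      exact_mod_cast PySem.Int.floordiv_natCast n 100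
    rw [hm, hdv, ih (n / 100) (by omega)]
    rw [Nat.digits_def' (by norm_num) hn]
    simp
    constructor
    · push_cast; ring
    · push_cast; ring
  · have h0 : n = 0 := by omega
    subst h0
    rw [fGo]
    simp

lemma f_eq_alt (x : Int) : f x = f_alt x := by
  by_cases hx : x ≤ 0
  · rw [f, fGo, f_alt, if_pos hx, dif_neg (by omega)]
  · have hn : x = ((x.toNat : Nat) : Int) := by omega
    have hnpos : 0 < x.toNat := by omega
    rw [f_alt, if_neg hx, f]
    rw [hn, fGo_spec x.toNat 0 0]
    have htc : PySem.Int.toChars ((x.toNat : Nat) : Int) = decChars x.toNat := by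
      rw [PySem.Int.toChars, if_neg (by omega), Int.toNat_natCast, toDigits_eq _ hnpos]
    simp only [htc]
    have hpc : (if (decChars x.toNat).length % 2 == 1 then '0' :: decChars x.toNat
        else decChars x.toNat) = padChars x.toNat := by rw [padChars]
    rw [hpc, chunksB_padChars x.toNat hnpos]
    simp [List.sum_reverse]

-- ===== VERDICT (by name: the statement is the Claim_ definition above) =====
theorem f_spec : Claim_equal_f := by
  intro x _
  unfold Spec_f
  exact f_eq_alt x
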